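-- pv_equiv track=rewrite | github.com/Depshen/PPP_25-26_1sem | 2lab/main.py | map_by_frequency
-- ===== SOURCE A (Python) =====
-- from collections import Counter, defaultdict
--
-- def map_by_frequency(s1, s2):
--     freq1 = Counter(s1)
--     freq2 = Counter(s2)
--
--     group1 = defaultdict(list)
--     for char, count in freq1.items():
--         group1[count].append(char)
--
--     group2 = defaultdict(list)
--     for char, count in freq2.items():
--         group2[count].append(char)
--
--     if sorted(group1.keys()) != sorted(group2.keys()):
--         return "Невозможно сопоставить: разные частоты"
--
--     result = []
--     for count in sorted(group1.keys()):
--         chars1 = sorted(group1[count])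
--         chars2 = sorted(group2[count])
--         if len(chars1) != len(chars2):
--             return "Невозможно сопоставить: разное количество символов на одну частоту"
--         for c1, c2 in zip(chars1, chars2):
--             result.append(f"{c1}={c2}")
--     return ' '.join(result)
-- ===== SOURCE B (Python) =====
-- from collections import Counter
--
-- def map_by_frequency(s1, s2):
--     freq1 = Counter(s1)
--     freq2 = Counter(s2)
--     if set(freq1.values()) != set(freq2.values()):
--         return "Невозможно сопоставить: разные частоты"
--     if sorted(freq1.values()) != sorted(freq2.values()):
--         return "Невозможно сопоставить: разное количество символов на одну частоту"
--     chars1 = sorted(freq1, key=lambda c: (freq1[c], c))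
--     chars2 = sorted(freq2, key=lambda c: (freq2[c], c))
--     return ' '.join(f"{a}={b}" for a, b in zip(chars1, chars2))
-- ===== Notes on version B (the rewrite author's own statement) =====
-- stated objective: simpler
-- what changed: Replaces A's defaultdict bucketing by count plus nested per-count sort/zip loops with two whole-list checks (set and sorted multiset of the frequency values) and a single sort of each character set by the key (frequency, char), then one zip.
import Mathlib
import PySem

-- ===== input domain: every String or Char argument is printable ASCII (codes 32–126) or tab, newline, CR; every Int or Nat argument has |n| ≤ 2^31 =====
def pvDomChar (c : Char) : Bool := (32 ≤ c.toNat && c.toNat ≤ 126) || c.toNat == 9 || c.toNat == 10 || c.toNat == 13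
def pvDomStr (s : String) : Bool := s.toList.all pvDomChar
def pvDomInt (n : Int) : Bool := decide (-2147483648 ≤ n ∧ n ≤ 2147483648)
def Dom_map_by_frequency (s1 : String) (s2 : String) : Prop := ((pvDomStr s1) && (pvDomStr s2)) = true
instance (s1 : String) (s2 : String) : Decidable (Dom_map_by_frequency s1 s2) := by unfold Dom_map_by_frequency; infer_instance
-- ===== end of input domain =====

-- B replaces A's defaultdict bucketing and nested per-count loops by two set/multiset
-- checks on the frequency values and a single sort by the key (frequency, char); objective: simpler.

def pvMsg1 : String := "Невозможно сопоставить: разные частоты"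
def pvMsg2 : String := "Невозможно сопоставить: разное количество символов на одну частоту"

def pvPairStr (p : Char × Char) : String := String.mk [p.1, '=', p.2]

-- ===== PORT A =====
-- group1[count].append(char) over freq.items()
def pvGroup (items : List (Char × Int)) : PySem.Dict Int (List Char) :=
  items.foldl (fun g p => g.modify p.2 [] (fun t => t ++ [p.1])) PySem.Dict.empty

-- the 'for count in sorted(group1.keys())' loop with its 'result' accumulator and early return
def pvLoopA (g1 g2 : PySem.Dict Int (List Char)) : List Int → List String → String
  | [], result => PySem.Str.join " " result
  | k :: ks, result =>
    let chars1 := PySem.List.sorted (g1.getD k []) (fun x => x)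
    let chars2 := PySem.List.sorted (g2.getD k []) (fun x => x)
    if chars1.length ≠ chars2.length then pvMsg2
    else pvLoopA g1 g2 ks ((chars1.zip chars2).foldl (fun r p => r ++ [pvPairStr p]) result)

def map_by_frequency (s1 : String) (s2 : String) : String :=
  let freq1 := PySem.Dict.counter s1.toList
  let freq2 := PySem.Dict.counter s2.toList
  let group1 := pvGroup freq1.items
  let group2 := pvGroup freq2.items
  if PySem.List.sorted group1.keys (fun x => x) ≠ PySem.List.sorted group2.keys (fun x => x) then pvMsg1
  else pvLoopA group1 group2 (PySem.List.sorted group1.keys (fun x => x)) []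

-- ===== PORT B =====
def map_by_frequency_alt (s1 : String) (s2 : String) : String :=
  let freq1 := PySem.Dict.counter s1.toList
  let freq2 := PySem.Dict.counter s2.toList
  if !(PySem.Set.equal (PySem.Set.ofList freq1.values) (PySem.Set.ofList freq2.values)) then pvMsg1
  else if PySem.List.sorted freq1.values (fun x => x) ≠ PySem.List.sorted freq2.values (fun x => x) then pvMsg2
  else
    let chars1 := PySem.List.sorted2 freq1.keys (fun c => freq1.getD c 0) (fun c => c)
    let chars2 := PySem.List.sorted2 freq2.keys (fun c => freq2.getD c 0) (fun c => c)
    PySem.Str.join " " ((chars1.zip chars2).map pvPairStr)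

-- ===== PRECONDITION & SPEC =====
def Spec_map_by_frequency (s1 : String) (s2 : String) (out : String) : Prop := out = map_by_frequency_alt s1 s2
instance (s1 : String) (s2 : String) (out : String) : Decidable (Spec_map_by_frequency s1 s2 out) := by unfold Spec_map_by_frequency; infer_instance

-- ===== CLAIM (what is proved, stated in full; the proofs are below) =====
def Claim_equal_map_by_frequency : Prop := ∀ (s1 : String) (s2 : String), Dom_map_by_frequency s1 s2 → Spec_map_by_frequency s1 s2 (map_by_frequency s1 s2)

-- ===== LEMMAS AND PROOFS =====

-- the lexicographic 'before' test used by sorted2 with keys (k1 c, c)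
def pvLex (k1 : Char → Int) (a b : Char) : Bool :=
  decide (k1 a < k1 b) || (!decide (k1 b < k1 a) && decide (a < b))

lemma pvLex_iff (k1 : Char → Int) (a b : Char) :
    pvLex k1 a b = true ↔ (k1 a < k1 b ∨ (k1 a = k1 b ∧ a < b)) := by
  simp only [pvLex, Bool.or_eq_true, Bool.and_eq_true, decide_eq_true_eq,
    Bool.not_eq_true', decide_eq_false_iff_not, not_lt]
  constructor
  · rintro (h | ⟨hle, hab⟩)
    · exact Or.inl h
    · rcases lt_or_eq_of_le hle with h | h
      · exact Or.inl h
      · exact Or.inr ⟨h, hab⟩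
  · rintro (h | ⟨he, hab⟩)
    · exact Or.inl h
    · exact Or.inr ⟨le_of_eq he, hab⟩

lemma pvLex_trans (k1 : Char → Int) {a b c : Char}
    (h1 : pvLex k1 a b = true) (h2 : pvLex k1 b c = true) : pvLex k1 a c = true := by
  rw [pvLex_iff] at h1 h2 ⊢
  rcases h1 with h1 | ⟨e1, l1⟩ <;> rcases h2 with h2 | ⟨e2, l2⟩
  · exact Or.inl (h1.trans h2)
  · exact Or.inl (e2 ▸ h1)
  · exact Or.inl (e1 ▸ h2)
  · exact Or.inr ⟨e1.trans e2, l1.trans l2⟩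

lemma pvLex_connex (k1 : Char → Int) {a b : Char} (h : a ≠ b) :
    pvLex k1 a b = true ∨ pvLex k1 b a = true := by
  rw [pvLex_iff, pvLex_iff]
  rcases lt_trichotomy (k1 a) (k1 b) with hk | hk | hk
  · exact Or.inl (Or.inl hk)
  · rcases lt_or_gt_of_ne h with hc | hc
    · exact Or.inl (Or.inr ⟨hk, hc⟩)
    · exact Or.inr (Or.inr ⟨hk.symm, hc⟩)
  · exact Or.inr (Or.inl hk)

lemma pvLex_antisym (k1 : Char → Int) {a b : Char}
    (h1 : pvLex k1 a b = true) (h2 : pvLex k1 b a = true) : a = b := by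
  rw [pvLex_iff] at h1 h2
  rcases h1 with h1 | ⟨e1, l1⟩ <;> rcases h2 with h2 | ⟨e2, l2⟩
  · exact absurd (h1.trans h2) (lt_irrefl _)
  · exact absurd h1 (e2 ▸ lt_irrefl _)
  · exact absurd h2 (e1 ▸ lt_irrefl _)
  · exact absurd (l1.trans l2) (lt_irrefl _)

lemma pvInsertBy_perm {α : Type} (bef : α → α → Bool) (x : α) (ys : List α) :
    (PySem.List.insertBy bef x ys).Perm (x :: ys) := by
  induction ys with
  | nil => simp [PySem.List.insertBy]
  | cons y ys ih =>
    by_cases h : bef x y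
    · simp [PySem.List.insertBy, h]
    · simp only [PySem.List.insertBy, h]
      exact (ih.cons y).trans (List.Perm.swap x y ys)

lemma pvInsertBy_pairwise (k1 : Char → Int) (x : Char) (ys : List Char)
    (hpw : ys.Pairwise (fun a b => pvLex k1 a b = true))
    (hx : ∀ y ∈ ys, x ≠ y) :
    (PySem.List.insertBy (pvLex k1) x ys).Pairwise (fun a b => pvLex k1 a b = true) := by
  induction ys with
  | nil => simp [PySem.List.insertBy]
  | cons y ys ih =>
    rw [List.pairwise_cons] at hpw
    by_cases h : pvLex k1 x y = true
    · simp only [PySem.List.insertBy, h, if_pos]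
      rw [List.pairwise_cons]
      refine ⟨?_, List.pairwise_cons.mpr hpw⟩
      intro b hb
      rcases List.mem_cons.mp hb with rfl | hb
      · exact h
      · exact pvLex_trans k1 h (hpw.1 b hb)
    · simp only [PySem.List.insertBy, h]
      rw [if_neg (by simp)]
      rw [List.pairwise_cons]
      constructor
      · intro b hb
        rcases (PySem.List.mem_insertBy (pvLex k1) x b ys).mp hb with rfl | hb
        · rcases pvLex_connex k1 (hx y (List.mem_cons_self)) with hc | hc
          · exact absurd hc (by simp [h])
          · exact hc
        · exact hpw.1 b hb
      · exact ih hpw.2 (fun y hy => hx y (List.mem_cons_of_mem _ hy))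

lemma pvFoldl_inv (k1 : Char → Int) (xs : List Char) : ∀ (acc : List Char),
    (acc ++ xs).Nodup → acc.Pairwise (fun a b => pvLex k1 a b = true) →
    (xs.foldl (fun a x => PySem.List.insertBy (pvLex k1) x a) acc).Perm (acc ++ xs) ∧
    (xs.foldl (fun a x => PySem.List.insertBy (pvLex k1) x a) acc).Pairwise
      (fun a b => pvLex k1 a b = true) := by
  induction xs with
  | nil =>
    intro acc hnd hpw
    refine ⟨?_, by simpa using hpw⟩
    simp
  | cons x xs ih =>
    intro acc hnd hpw
    have hxacc : x ∉ acc := by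
      intro hmem
      exact List.disjoint_of_nodup_append hnd hmem List.mem_cons_self
    have hperm1 : (PySem.List.insertBy (pvLex k1) x acc).Perm (acc ++ [x]) :=
      (pvInsertBy_perm (pvLex k1) x acc).trans
        (List.perm_append_singleton x acc).symm
    have hpermctx : ((PySem.List.insertBy (pvLex k1) x acc) ++ xs).Perm (acc ++ x :: xs) := by
      refine (hperm1.append_right xs).trans ?_
      rw [List.append_assoc]
      exact List.Perm.refl _
    have hnd' : ((PySem.List.insertBy (pvLex k1) x acc) ++ xs).Nodup :=
      hpermctx.symm.nodup hnd
    have hpw' : (PySem.List.insertBy (pvLex k1) x acc).Pairwise (fun a b => pvLex k1 a b = true) := by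
      refine pvInsertBy_pairwise k1 x acc hpw (fun y hy => ?_)
      intro rfl
      exact hxacc hy
    obtain ⟨hp, hq⟩ := ih (PySem.List.insertBy (pvLex k1) x acc) hnd' hpw'
    rw [List.foldl_cons]
    exact ⟨hp.trans hpermctx, hq⟩

lemma pvSorted2_eq (k1 : Char → Int) (xs ys : List Char) (hnd : xs.Nodup)
    (hperm : ys.Perm xs) (hpw : ys.Pairwise (fun a b => pvLex k1 a b = true)) :
    PySem.List.sorted2 xs k1 (fun c => c) = ys := by
  have hdef : PySem.List.sorted2 xs k1 (fun c => c) =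
      xs.foldl (fun a x => PySem.List.insertBy (pvLex k1) x a) [] := rfl
  rw [hdef]
  have hinv := pvFoldl_inv k1 xs [] (by simpa using hnd) (by simp)
  rw [List.nil_append] at hinv
  obtain ⟨hp, hq⟩ := hinv
  refine List.eq_of_perm_of_sorted ?_ hq hpw (hp.trans hperm.symm)
  intro a b _ _ hab hba
  exact pvLex_antisym k1 hab hba

-- ===== the grouping dict =====

lemma pvGroup_getD_aux (l : List (Char × Int)) : ∀ (d : PySem.Dict Int (List Char)) (k : Int),
    (l.foldl (fun g p => g.modify p.2 [] (fun t => t ++ [p.1])) d).getD k [] =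
      d.getD k [] ++ (l.filter (fun p => p.2 == k)).map Prod.fst := by
  induction l with
  | nil => simp
  | cons p l ih =>
    intro d k
    rw [List.foldl_cons]
    rw [ih]
    by_cases h : p.2 = k
    · subst h
      simp [PySem.Dict.modify, PySem.Dict.getD_insert_self]
    · have hne : k ≠ p.2 := fun hh => h hh.symm
      simp [PySem.Dict.modify, PySem.Dict.getD_insert_of_ne _ _ _ hne, h]

lemma pvGroup_mem_keys_aux (l : List (Char × Int)) : ∀ (d : PySem.Dict Int (List Char)) (k : Int),
    (k ∈ (l.foldl (fun g p => g.modify p.2 [] (fun t => t ++ [p.1])) d).keys ↔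
      k ∈ d.keys ∨ k ∈ l.map Prod.snd) := by
  induction l with
  | nil => simp
  | cons p l ih =>
    intro d k
    rw [List.foldl_cons]
    rw [ih]
    simp only [PySem.Dict.modify, PySem.Dict.mem_keys_insert, List.map_cons, List.mem_cons]
    tauto

lemma pvKeys_insert (d : PySem.Dict Int (List Char)) (k : Int) (v : List Char) :
    (d.insert k v).keys = if d.contains k then d.keys else d.keys ++ [k] := by
  by_cases h : d.contains k
  · rw [if_pos h]
    simp only [PySem.Dict.keys, PySem.Dict.items_insert, h, if_true, List.map_map]
    apply List.map_congr_left
    intro p _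
    by_cases hp : p.1 = k
    · simp [Function.comp_apply, hp]
    · simp [Function.comp_apply, hp]
  · rw [if_neg h]
    simp [PySem.Dict.keys, PySem.Dict.items_insert, h]

lemma pvGroup_keys_nodup_aux (l : List (Char × Int)) : ∀ (d : PySem.Dict Int (List Char)),
    d.keys.Nodup → (l.foldl (fun g p => g.modify p.2 [] (fun t => t ++ [p.1])) d).keys.Nodup := by
  induction l with
  | nil => intro d h; simpa using h
  | cons p l ih =>
    intro d h
    rw [List.foldl_cons]
    refine ih _ ?_
    simp only [PySem.Dict.modify]
    rw [pvKeys_insert]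
    by_cases hc : d.contains p.2
    · simpa [hc] using h
    · have hnm : p.2 ∉ d.keys := by
        rw [PySem.Dict.contains_eq_decide_mem_keys] at hc
        simpa using hc
      rw [if_neg hc, List.nodup_append]
      refine ⟨h, List.nodup_singleton _, ?_⟩
      intro a ha b hb
      rw [List.mem_singleton] at hb
      subst hb
      exact fun hEq => hnm (hEq ▸ ha)

-- abbreviations for the proof
def pvCnt (t : List Char) (c : Char) : Int := (t.count c : Int)
def pvF (t : List Char) : PySem.Dict Char Int := PySem.Dict.counter t
def pvG (t : List Char) : PySem.Dict Int (List Char) := pvGroup (pvF t).items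

lemma pvF_values (t : List Char) : (pvF t).values = (PySem.Set.ofList t).map (pvCnt t) := by
  simp [pvF, PySem.Dict.values, PySem.Dict.items_counter, List.map_map, pvCnt, Function.comp_def]

lemma pvF_keys (t : List Char) : (pvF t).keys = PySem.Set.ofList t := by
  simp [pvF, PySem.Dict.keys, PySem.Dict.items_counter, List.map_map, Function.comp_def]

lemma pvG_getD (t : List Char) (k : Int) :
    (pvG t).getD k [] = (PySem.Set.ofList t).filter (fun c => pvCnt t c == k) := by
  rw [pvG, pvGroup, pvGroup_getD_aux, PySem.Dict.getD_empty, List.nil_append]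
  rw [pvF, PySem.Dict.items_counter]
  rw [List.filter_map]
  simp [List.map_map, Function.comp_def, pvCnt]

lemma pvG_mem_keys (t : List Char) (k : Int) :
    k ∈ (pvG t).keys ↔ k ∈ (pvF t).values := by
  rw [pvG, pvGroup, pvGroup_mem_keys_aux, pvF_values]
  rw [pvF, PySem.Dict.items_counter]
  simp [PySem.Dict.keys_empty, List.map_map, Function.comp_def, pvCnt]

lemma pvG_keys_nodup (t : List Char) : (pvG t).keys.Nodup := by
  refine pvGroup_keys_nodup_aux _ _ ?_
  simp [PySem.Dict.keys_empty]

lemma pvG_getD_length (t : List Char) (k : Int) :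
    ((pvG t).getD k []).length = (pvF t).values.count k := by
  rw [pvG_getD, pvF_values]
  simp [List.count_eq_countP, List.countP_map, ← List.countP_eq_length_filter, Function.comp_def]

-- value of the A loop
lemma pvLoopA_eq (g1 g2 : PySem.Dict Int (List Char)) (ks : List Int) : ∀ (res : List String),
    pvLoopA g1 g2 ks res =
      if ks.any (fun k => (g1.getD k []).length ≠ (g2.getD k []).length) then pvMsg2
      else PySem.Str.join " " (res ++ ks.flatMap (fun k =>
        ((PySem.List.sorted (g1.getD k []) (fun x => x)).zip
          (PySem.List.sorted (g2.getD k []) (fun x => x))).map pvPairStr)) := by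
  induction ks with
  | nil => intro res; simp [pvLoopA]
  | cons k ks ih =>
    intro res
    rw [pvLoopA]
    by_cases h : (g1.getD k []).length ≠ (g2.getD k []).length
    · rw [if_pos (by simpa [PySem.List.length_sorted] using h)]
      rw [if_pos]
      simp [List.any_cons, h]
    · rw [if_neg (by simpa [PySem.List.length_sorted] using h)]
      rw [ih]
      rw [PySem.List.foldl_append_singleton_eq_map]
      simp only [List.any_cons, List.flatMap_cons, h, decide_false,
        Bool.false_or, List.append_assoc]

-- equality of the sorted values lists ↔ permutation
lemma pvVals_perm_iff (t1 t2 : List Char) :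
    (PySem.List.sorted (pvF t1).values (fun x => x) = PySem.List.sorted (pvF t2).values (fun x => x)) ↔
      (pvF t1).values.Perm (pvF t2).values :=
  PySem.List.sorted_id_eq_sorted_id_iff_perm _ _

-- first check: sorted key lists equal ↔ sets of values equal
lemma pvCheck1_iff (t1 t2 : List Char) :
    (PySem.List.sorted (pvG t1).keys (fun x => x) = PySem.List.sorted (pvG t2).keys (fun x => x)) ↔
      PySem.Set.equal (PySem.Set.ofList (pvF t1).values) (PySem.Set.ofList (pvF t2).values) = true := by
  rw [PySem.List.sorted_id_eq_sorted_id_iff_perm,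
    List.perm_ext_iff_of_nodup (pvG_keys_nodup t1) (pvG_keys_nodup t2), PySem.Set.equal_iff]
  simp only [PySem.Set.mem_ofList, pvG_mem_keys]

-- second check (assuming first passed): some group size differs ↔ values not a permutation
lemma pvCheck2_iff (t1 t2 : List Char)
    (h1 : ∀ k : Int, k ∈ (pvF t1).values ↔ k ∈ (pvF t2).values) :
    ((PySem.List.sorted (pvG t1).keys (fun x => x)).any
        (fun k => decide (((pvG t1).getD k []).length ≠ ((pvG t2).getD k []).length)) = true) ↔
      ¬ (pvF t1).values.Perm (pvF t2).values := by
  rw [List.any_eq_true]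
  constructor
  · rintro ⟨k, _, hk⟩ hperm
    rw [decide_eq_true_eq, pvG_getD_length, pvG_getD_length] at hk
    exact hk (List.perm_iff_count.mp hperm k)
  · intro hperm
    rw [List.perm_iff_count] at hperm
    obtain ⟨k, hk⟩ := not_forall.mp hperm
    refine ⟨k, ?_, by rw [decide_eq_true_eq, pvG_getD_length, pvG_getD_length]; exact hk⟩
    rw [PySem.List.mem_sorted, pvG_mem_keys]
    by_contra hmem
    have h01 : (pvF t1).values.count k = 0 := List.count_eq_zero.mpr hmem
    have hmem2 : k ∉ (pvF t2).values := fun hm => hmem ((h1 k).mpr hm)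
    have h02 : (pvF t2).values.count k = 0 := List.count_eq_zero.mpr hmem2
    exact hk (h01.trans h02.symm)

-- partition of the distinct characters by frequency, each block sorted
lemma pvPartition_perm (cnt : Char → Int) : ∀ (ks : List Int) (l : List Char), ks.Nodup →
    (∀ c ∈ l, cnt c ∈ ks) →
    (ks.flatMap (fun k => PySem.List.sorted (l.filter (fun c => cnt c == k)) (fun x => x))).Perm l := by
  intro ks
  induction ks with
  | nil =>
    intro l _ hall
    have : l = [] := List.eq_nil_iff_forall_not_mem.mpr (fun a ha => by simpa using hall a ha)
    simp [this]
  | cons k ks ih =>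
    intro l hnd hall
    rw [List.flatMap_cons]
    have htail : ∀ k' ∈ ks,
        (l.filter (fun c => !(cnt c == k))).filter (fun c => cnt c == k') =
          l.filter (fun c => cnt c == k') := by
      intro k' hk'
      have hkk : k' ≠ k := fun hh => (List.nodup_cons.mp hnd).1 (hh ▸ hk')
      rw [List.filter_filter]
      apply List.filter_congr
      intro c _
      by_cases hc : cnt c = k'
      · simp [hc, hkk]
      · simp [hc]
    have hperm2 : (ks.flatMap (fun k' =>
        PySem.List.sorted (l.filter (fun c => cnt c == k')) (fun x => x))).Perm
          (l.filter (fun c => !(cnt c == k))) := by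
      have hrw : ks.flatMap (fun k' =>
          PySem.List.sorted (l.filter (fun c => cnt c == k')) (fun x => x)) =
          ks.flatMap (fun k' =>
            PySem.List.sorted ((l.filter (fun c => !(cnt c == k))).filter
              (fun c => cnt c == k')) (fun x => x)) := by
        rw [List.flatMap_def, List.flatMap_def]
        congr 1
        apply List.map_congr_left
        intro k' hk'
        rw [htail k' hk']
      rw [hrw]
      refine ih _ (List.nodup_cons.mp hnd).2 ?_
      intro c hc
      have hmem := List.mem_filter.mp hc
      rcases List.mem_cons.mp (hall c hmem.1) with h | h
      · exact absurd h (by simpa using hmem.2)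
      · exact h
    refine List.Perm.trans (List.Perm.append (PySem.List.sorted_perm _ _ _) hperm2) ?_
    exact List.filter_append_perm _ l

lemma pvFlat_eq_sorted2 (t : List Char) :
    PySem.List.sorted2 (pvF t).keys (fun c => (pvF t).getD c 0) (fun c => c) =
      (PySem.List.sorted (pvG t).keys (fun x => x)).flatMap
        (fun k => PySem.List.sorted ((pvG t).getD k []) (fun x => x)) := by
  have hkey : (fun c => (pvF t).getD c 0) = pvCnt t := by
    funext c
    rw [pvF, PySem.Dict.getD_counter]
    rfl
  rw [hkey]
  set S := PySem.Set.ofList t with hS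
  set sk := PySem.List.sorted (pvG t).keys (fun x => x) with hsk
  have hndS : S.Nodup := PySem.Set.nodup_ofList t
  have hndsk : sk.Nodup := (PySem.List.sorted_perm _ _ _).symm.nodup (pvG_keys_nodup t)
  have hmemcnt : ∀ c ∈ S, pvCnt t c ∈ sk := by
    intro c hc
    rw [hsk, PySem.List.mem_sorted, pvG_mem_keys, pvF_values]
    exact List.mem_map.mpr ⟨c, hc, rfl⟩
  have hgetD : ∀ k, (pvG t).getD k [] = S.filter (fun c => pvCnt t c == k) := fun k => pvG_getD t k
  apply pvSorted2_eq
  · rw [pvF_keys]; exact hndS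
  · -- permutation
    rw [pvF_keys, ← hS]
    have hrw : sk.flatMap (fun k => PySem.List.sorted ((pvG t).getD k []) (fun x => x)) =
        sk.flatMap (fun k => PySem.List.sorted (S.filter (fun c => pvCnt t c == k)) (fun x => x)) := by
      rw [List.flatMap_def, List.flatMap_def]
      congr 1
      apply List.map_congr_left
      intro k _
      rw [hgetD k]
    rw [hrw]
    exact pvPartition_perm (pvCnt t) sk S hndsk hmemcnt
  · -- pairwise
    rw [List.flatMap_def, List.pairwise_flatten]
    constructor
    · intro l hl
      rw [List.mem_map] at hl
      obtain ⟨k, hk, rfl⟩ := hl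
      have hnd' : (PySem.List.sorted ((pvG t).getD k []) (fun x => x)).Nodup := by
        rw [hgetD k]
        exact (PySem.List.sorted_perm _ _ _).symm.nodup (hndS.filter _)
      have hle : (PySem.List.sorted ((pvG t).getD k []) (fun x => x)).Pairwise
          (fun a b : Char => a ≤ b) := PySem.List.sorted_pairwise _ _
      have hcomb := hle.and hnd'
      refine hcomb.imp_of_mem (fun {a b} ha hb hab => ?_)
      have hca : pvCnt t a = k := by
        have := (PySem.List.mem_sorted _ _ _ _).mp ha
        rw [hgetD k] at this
        simpa using (List.mem_filter.mp this).2
      have hcb : pvCnt t b = k := by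
        have := (PySem.List.mem_sorted _ _ _ _).mp hb
        rw [hgetD k] at this
        simpa using (List.mem_filter.mp this).2
      rw [pvLex_iff]
      exact Or.inr ⟨hca.trans hcb.symm, lt_of_le_of_ne hab.1 hab.2⟩
    · rw [List.pairwise_map]
      have hle : sk.Pairwise (fun a b : Int => a ≤ b) := by
        rw [hsk]; exact PySem.List.sorted_pairwise _ _
      have hcomb := hle.and hndsk
      refine hcomb.imp ?_
      rintro k1 k2 ⟨hk, hne⟩ x hx y hy
      have hcx : pvCnt t x = k1 := by
        have := (PySem.List.mem_sorted _ _ _ _).mp hx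
        rw [hgetD k1] at this
        simpa using (List.mem_filter.mp this).2
      have hcy : pvCnt t y = k2 := by
        have := (PySem.List.mem_sorted _ _ _ _).mp hy
        rw [hgetD k2] at this
        simpa using (List.mem_filter.mp this).2
      rw [pvLex_iff]
      exact Or.inl (by rw [hcx, hcy]; exact lt_of_le_of_ne hk hne)

lemma pvZipFlat {α : Type} (ks : List Int) (F G : Int → List α)
    (h : ∀ k ∈ ks, (F k).length = (G k).length) :
    (ks.flatMap F).zip (ks.flatMap G) = ks.flatMap (fun k => (F k).zip (G k)) := by
  induction ks with
  | nil => simp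
  | cons k ks ih =>
    rw [List.flatMap_cons, List.flatMap_cons, List.flatMap_cons]
    rw [List.zip_append (h k List.mem_cons_self)]
    rw [ih (fun k' hk' => h k' (List.mem_cons_of_mem _ hk'))]

theorem pvMain (s1 s2 : String) : map_by_frequency s1 s2 = map_by_frequency_alt s1 s2 := by
  set t1 := s1.toList with ht1
  set t2 := s2.toList with ht2
  show (if PySem.List.sorted (pvG t1).keys (fun x => x) ≠ PySem.List.sorted (pvG t2).keys (fun x => x)
        then pvMsg1
        else pvLoopA (pvG t1) (pvG t2) (PySem.List.sorted (pvG t1).keys (fun x => x)) []) =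
      (if !(PySem.Set.equal (PySem.Set.ofList (pvF t1).values) (PySem.Set.ofList (pvF t2).values))
        then pvMsg1
        else if PySem.List.sorted (pvF t1).values (fun x => x) ≠ PySem.List.sorted (pvF t2).values (fun x => x)
        then pvMsg2
        else PySem.Str.join " "
          (((PySem.List.sorted2 (pvF t1).keys (fun c => (pvF t1).getD c 0) (fun c => c)).zip
            (PySem.List.sorted2 (pvF t2).keys (fun c => (pvF t2).getD c 0) (fun c => c))).map pvPairStr))
  by_cases h1 : PySem.List.sorted (pvG t1).keys (fun x => x) = PySem.List.sorted (pvG t2).keys (fun x => x)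
  · have hset : PySem.Set.equal (PySem.Set.ofList (pvF t1).values) (PySem.Set.ofList (pvF t2).values) = true :=
      (pvCheck1_iff t1 t2).mp h1
    rw [if_neg (show ¬ _ ≠ _ from fun hne => hne h1), if_neg (by simp [hset])]
    have hmem : ∀ k : Int, k ∈ (pvF t1).values ↔ k ∈ (pvF t2).values := by
      intro k
      have := (PySem.Set.equal_iff _ _).mp hset k
      rwa [PySem.Set.mem_ofList, PySem.Set.mem_ofList] at this
    rw [pvLoopA_eq]
    by_cases h2 : (pvF t1).values.Perm (pvF t2).values
    · rw [if_neg (show ¬ _ = true from fun hany => ((pvCheck2_iff t1 t2 hmem).mp hany) h2)]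
      rw [if_neg (show ¬ _ ≠ _ from fun hh => hh ((pvVals_perm_iff t1 t2).mpr h2))]
      rw [List.nil_append]
      congr 1
      rw [pvFlat_eq_sorted2 t1, pvFlat_eq_sorted2 t2]
      rw [← h1]
      rw [pvZipFlat]
      · rw [List.map_flatMap]
      · intro k _
        rw [PySem.List.length_sorted, PySem.List.length_sorted, pvG_getD_length, pvG_getD_length]
        exact List.perm_iff_count.mp h2 k
    · rw [if_pos ((pvCheck2_iff t1 t2 hmem).mpr h2)]
      rw [if_pos (show _ ≠ _ from fun hh => h2 ((pvVals_perm_iff t1 t2).mp hh))]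
  · rw [if_pos h1]
    have hset : ¬ PySem.Set.equal (PySem.Set.ofList (pvF t1).values) (PySem.Set.ofList (pvF t2).values) = true :=
      fun hh => h1 ((pvCheck1_iff t1 t2).mpr hh)
    have hf : PySem.Set.equal (PySem.Set.ofList (pvF t1).values) (PySem.Set.ofList (pvF t2).values) = false :=
      Bool.eq_false_iff.mpr hset
    rw [if_pos (show (!(PySem.Set.equal (PySem.Set.ofList (pvF t1).values)
      (PySem.Set.ofList (pvF t2).values))) = true by rw [hf]; rfl)]

-- ===== VERDICT (by name: the statement is the Claim_ definition above) =====
theorem map_by_frequency_spec : Claim_equal_map_by_frequency := by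
  intro s1 s2 _
  show map_by_frequency s1 s2 = map_by_frequency_alt s1 s2
  exact pvMain s1 s2
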